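-- pv_equiv track=rewrite | github.com/ASSERT-KTH/Mokav | experiments/pynguin/c4b/return-lst/generated_tests/src_235/1/src_235.py | func
-- ===== SOURCE A (Python) =====
-- def func(*args):
-- 	ret_values = []
--
-- 	a = int(args[0])
-- 	b = int(args[1])
-- 	c = int(args[2])
-- 	i = 0
-- 	p = 0
-- 	for i in range((a + 1)):
-- 	    if (((2 * i) <= b) and ((4 * i) <= c)):
-- 	        p = i
-- 	if (p > 0):
-- 	    sum = ((p + (2 * p)) + (4 * p))
-- 	else:
-- 	    sum = 0
-- 	ret_values.append(sum)
--
-- 	return ret_values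
-- ===== SOURCE B (Python) =====
-- def func(*args):
--     a = int(args[0])
--     b = int(args[1])
--     c = int(args[2])
--     p = min(a, b // 2, c // 4)
--     return [7 * p if p > 0 else 0]
-- ===== Notes on version B (the rewrite author's own statement) =====
-- stated objective: faster
-- what changed: Replaces the O(a) scan for the last i with 2i<=b and 4i<=c by the closed form p = min(a, b//2, c//4) clamped at 0, returning [7p].
import Mathlib
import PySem

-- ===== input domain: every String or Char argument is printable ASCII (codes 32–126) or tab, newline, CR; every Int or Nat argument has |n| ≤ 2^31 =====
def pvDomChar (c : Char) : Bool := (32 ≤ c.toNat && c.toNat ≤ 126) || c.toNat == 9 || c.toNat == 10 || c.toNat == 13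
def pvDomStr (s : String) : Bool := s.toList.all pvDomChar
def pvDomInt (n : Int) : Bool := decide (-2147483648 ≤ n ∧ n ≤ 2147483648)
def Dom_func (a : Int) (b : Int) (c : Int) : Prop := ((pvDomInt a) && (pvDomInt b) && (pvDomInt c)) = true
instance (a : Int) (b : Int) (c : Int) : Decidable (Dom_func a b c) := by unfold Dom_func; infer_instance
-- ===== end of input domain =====

-- B replaces A's O(a) linear scan by the closed form p = min(a, b//2, c//4) clamped at 0; return value only.

-- ===== PORT A =====
-- loop 'for i in range(a+1): if 2*i<=b and 4*i<=c: p = i', then sum = p+2p+4p if p>0 else 0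
def func (a : Int) (b : Int) (c : Int) : List Int :=
  let p := (PySem.List.pyRange 0 (a + 1) 1).foldl
    (fun p i => if 2 * i ≤ b ∧ 4 * i ≤ c then i else p) 0
  let sum := if p > 0 then (p + 2 * p) + 4 * p else 0
  [sum]

-- ===== PORT B =====
def func_alt (a : Int) (b : Int) (c : Int) : List Int :=
  let p := min a (min (PySem.Int.floordiv b 2) (PySem.Int.floordiv c 4))
  [if p > 0 then 7 * p else 0]

-- ===== PRECONDITION & SPEC =====
def Spec_func (a : Int) (b : Int) (c : Int) (out : List Int) : Prop := out = func_alt a b c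
instance (a : Int) (b : Int) (c : Int) (out : List Int) : Decidable (Spec_func a b c out) := by unfold Spec_func; infer_instance

-- ===== CLAIM (what is proved, stated in full; the proofs are below) =====
def Claim_equal_func : Prop := ∀ (a : Int) (b : Int) (c : Int), Dom_func a b c → Spec_func a b c (func a b c)

-- ===== LEMMAS AND PROOFS =====

-- the loop keeps the last i ∈ [0, n) with i ≤ m
theorem pv_fold_last_le (m : Int) (n : Nat) :
    (PySem.List.pyRange 0 (n : Int) 1).foldl (fun p i => if i ≤ m then i else p) 0
      = max 0 (min ((n : Int) - 1) m) := by
  induction n with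
  | zero =>
    rw [PySem.List.pyRange_one_eq_nil (by omega)]
    simp only [List.foldl]
    omega
  | succ k ih =>
    have h : PySem.List.pyRange 0 ((k : Int) + 1) 1
        = PySem.List.pyRange 0 (k : Int) 1 ++ [(k : Int)] :=
      PySem.List.pyRange_one_succ_right (by exact_mod_cast Nat.zero_le k)
    push_cast
    rw [h, List.foldl_append, ih]
    simp only [List.foldl]
    split_ifs with hk <;> omega

theorem func_spec : Claim_equal_func := by
  intro a b c _
  unfold Spec_func
  simp only [func, func_alt]
  by_cases ha : a + 1 ≤ 0
  · rw [PySem.List.pyRange_one_eq_nil ha]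
    simp only [List.foldl]
    rw [if_neg (by omega), if_neg (by omega)]
  · set m := min (PySem.Int.floordiv b 2) (PySem.Int.floordiv c 4) with hm
    have hcond : ∀ (p i : Int), i ∈ PySem.List.pyRange 0 (a + 1) 1 →
        (if 2 * i ≤ b ∧ 4 * i ≤ c then i else p) = (if i ≤ m then i else p) := by
      intro p i _
      have hb : 2 * i ≤ b ↔ i ≤ PySem.Int.floordiv b 2 := by
        rw [PySem.Int.le_floordiv_iff_mul_le (by omega)]; omega
      have hc : 4 * i ≤ c ↔ i ≤ PySem.Int.floordiv c 4 := by
        rw [PySem.Int.le_floordiv_iff_mul_le (by omega)]; omega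
      by_cases h : 2 * i ≤ b ∧ 4 * i ≤ c
      · rw [if_pos h, if_pos (by rw [hm]; omega)]
      · rw [if_neg h, if_neg (by rw [hm] at *; omega)]
    have hcg : List.foldl (fun p i => if 2 * i ≤ b ∧ 4 * i ≤ c then i else p) 0
          (PySem.List.pyRange 0 (a + 1) 1)
        = List.foldl (fun p i => if i ≤ m then i else p) 0 (PySem.List.pyRange 0 (a + 1) 1) :=
      PySem.List.foldl_congr_mem _ _ _ _ hcond
    rw [hcg]
    have hn : ((a + 1).toNat : Int) = a + 1 := Int.toNat_of_nonneg (by omega)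
    have hfold := pv_fold_last_le m (a + 1).toNat
    rw [hn] at hfold
    rw [hfold]
    rcases le_or_gt (min a m) 0 with h | h
    · rw [if_neg (by omega), if_neg (by omega)]
    · rw [if_pos (by omega), if_pos h]
      congr 1
      omega
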